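-- pv_equiv track=rewrite | github.com/jaychitransh007/TheSigmaAura | modules/style_engine/src/style_engine/outfit_engine.py | _occasion_related
-- ===== SOURCE A (Python) =====
-- from typing import Any, Dict, List, Sequence, Set, Tuple
--
-- def _norm(value: Any) -> str:
--     return (str(value or "")).strip().lower()
--
-- def _occasion_related(a: str, b: str, related_groups: Sequence[Sequence[str]]) -> bool:
--     na = _norm(a)
--     nb = _norm(b)
--     for group in related_groups:
--         g = {_norm(x) for x in group}
--         if na in g and nb in g:
--             return True
--     return False
-- ===== SOURCE B (Python) =====
-- def _occasion_related(a, b, related_groups):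
--     def norm(v):
--         return (str(v or "")).strip().lower()
--     index = {}
--     for i, group in enumerate(related_groups):
--         for x in group:
--             index.setdefault(norm(x), set()).add(i)
--     ia = index.get(norm(a), set())
--     ib = index.get(norm(b), set())
--     return not ia.isdisjoint(ib)
-- ===== Notes on version B (the rewrite author's own statement) =====
-- stated objective: alternative
-- what changed: Replaces the per-group build-a-set-and-test scan with an inverted index (normalized element -> set of group indices) built in one pass, answering the query by a set-disjointness test.
import Mathlib
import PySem

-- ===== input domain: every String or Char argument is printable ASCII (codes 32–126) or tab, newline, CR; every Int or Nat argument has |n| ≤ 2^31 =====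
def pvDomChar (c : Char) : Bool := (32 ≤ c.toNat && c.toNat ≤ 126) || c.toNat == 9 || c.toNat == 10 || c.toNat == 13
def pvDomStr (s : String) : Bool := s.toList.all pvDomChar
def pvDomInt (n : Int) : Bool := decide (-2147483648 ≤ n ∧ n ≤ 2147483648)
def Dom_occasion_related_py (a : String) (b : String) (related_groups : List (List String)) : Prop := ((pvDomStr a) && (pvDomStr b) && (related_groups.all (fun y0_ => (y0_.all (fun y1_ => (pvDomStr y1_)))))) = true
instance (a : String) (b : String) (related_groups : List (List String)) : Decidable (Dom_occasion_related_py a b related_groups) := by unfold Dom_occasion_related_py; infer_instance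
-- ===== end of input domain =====

-- B replaces A's per-group normalize-and-test scan by an inverted index (normalized element -> set of group indices)
-- and a set-disjointness test; alternative decomposition, same asymptotic cost.

-- ===== PORT A =====
-- _norm(value) on a string argument: 'value or ""' is the identity (empty stays empty), then strip().lower()
def pvNorm (s : String) : String := PySem.Str.lower (PySem.Str.strip s)

def pvGoA (na nb : String) : List (List String) → Bool
  | [] => false
  | group :: rest =>
    let g : PySem.Set String := PySem.Set.ofList (group.map pvNorm)
    if PySem.Set.contains g na && PySem.Set.contains g nb then true
    else pvGoA na nb rest

def occasion_related_py (a : String) (b : String) (related_groups : List (List String)) : Bool :=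
  pvGoA (pvNorm a) (pvNorm b) related_groups

-- ===== PORT B =====
-- index.setdefault(norm(x), set()).add(i)  ==  d.modify (norm x) ∅ (·.add i)
def pvIndex (related_groups : List (List String)) : PySem.Dict String (PySem.Set Int) :=
  (PySem.List.enumerate related_groups).foldl
    (fun d p => p.2.foldl (fun d x => d.modify (pvNorm x) [] (fun t => PySem.Set.add t p.1)) d)
    PySem.Dict.empty

def occasion_related_py_alt (a : String) (b : String) (related_groups : List (List String)) : Bool :=
  let index := pvIndex related_groups
  let ia := index.getD (pvNorm a) []
  let ib := index.getD (pvNorm b) []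
  !(PySem.Set.isdisjoint ia ib)

-- ===== PRECONDITION & SPEC =====
def Spec_occasion_related_py (a : String) (b : String) (related_groups : List (List String)) (out : Bool) : Prop := out = occasion_related_py_alt a b related_groups
instance (a : String) (b : String) (related_groups : List (List String)) (out : Bool) : Decidable (Spec_occasion_related_py a b related_groups out) := by unfold Spec_occasion_related_py; infer_instance

-- ===== CLAIM (what is proved, stated in full; the proofs are below) =====
def Claim_equal_occasion_related_py : Prop := ∀ (a : String) (b : String) (related_groups : List (List String)), Dom_occasion_related_py a b related_groups → Spec_occasion_related_py a b related_groups (occasion_related_py a b related_groups)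

-- ===== LEMMAS AND PROOFS =====

-- inner loop of the index build: what one group's pass adds
theorem pv_mem_getD_inner (g : List String) (d : PySem.Dict String (PySem.Set Int))
    (j : Int) (s : String) (i : Int) :
    i ∈ (g.foldl (fun d x => d.modify (pvNorm x) [] (fun t => PySem.Set.add t j)) d).getD s []
      ↔ i ∈ d.getD s [] ∨ (i = j ∧ s ∈ g.map pvNorm) := by
  induction g generalizing d with
  | nil => simp
  | cons x xs ih =>
    simp only [List.foldl_cons, ih, PySem.Dict.getD_modify, List.map_cons, List.mem_cons]
    by_cases h : s = pvNorm x
    · subst h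
      rw [if_pos rfl, PySem.Set.mem_add]
      constructor
      · rintro ((hm | rfl) | ⟨rfl, hs⟩)
        · exact Or.inl hm
        · exact Or.inr ⟨rfl, Or.inl rfl⟩
        · exact Or.inr ⟨rfl, Or.inr hs⟩
      · rintro (hm | ⟨rfl, hs | hs⟩)
        · exact Or.inl (Or.inl hm)
        · exact Or.inl (Or.inr rfl)
        · exact Or.inr ⟨rfl, hs⟩
    · rw [if_neg h]
      constructor
      · rintro (hm | ⟨rfl, hs⟩)
        · exact Or.inl hm
        · exact Or.inr ⟨rfl, Or.inr hs⟩
      · rintro (hm | ⟨rfl, hs | hs⟩)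
        · exact Or.inl hm
        · exact absurd hs h
        · exact Or.inr ⟨rfl, hs⟩

-- outer loop over the enumerated groups
theorem pv_mem_getD_outer (pairs : List (Int × List String))
    (d : PySem.Dict String (PySem.Set Int)) (s : String) (i : Int) :
    i ∈ (pairs.foldl
          (fun d p => p.2.foldl (fun d x => d.modify (pvNorm x) [] (fun t => PySem.Set.add t p.1)) d)
          d).getD s []
      ↔ i ∈ d.getD s [] ∨ ∃ p ∈ pairs, i = p.1 ∧ s ∈ p.2.map pvNorm := by
  induction pairs generalizing d with
  | nil => simp
  | cons p ps ih =>
    simp only [List.foldl_cons, ih, pv_mem_getD_inner, List.mem_cons]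
    constructor
    · rintro (⟨h | h⟩ | h)
      · exact Or.inl h
      · exact Or.inr ⟨p, Or.inl rfl, h⟩
      · obtain ⟨q, hq, h⟩ := h; exact Or.inr ⟨q, Or.inr hq, h⟩
    · rintro (h | ⟨q, hq | hq, h⟩)
      · exact Or.inl (Or.inl h)
      · subst hq; exact Or.inl (Or.inr h)
      · exact Or.inr ⟨q, hq, h⟩

theorem pv_mem_index (G : List (List String)) (s : String) (i : Int) :
    i ∈ (pvIndex G).getD s []
      ↔ ∃ (k : Nat) (h : k < G.length), i = (k : Int) ∧ s ∈ (G[k]).map pvNorm := by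
  unfold pvIndex
  rw [pv_mem_getD_outer]
  simp only [PySem.Dict.getD_empty, List.not_mem_nil, false_or]
  constructor
  · rintro ⟨p, hp, hi, hs⟩
    rw [PySem.List.mem_enumerate_iff] at hp
    obtain ⟨k, hk, rfl⟩ := hp
    exact ⟨k, hk, by simpa using hi, hs⟩
  · rintro ⟨k, hk, hi, hs⟩
    refine ⟨((k : Int), G[k]), ?_, by simpa using hi, hs⟩
    rw [PySem.List.mem_enumerate_iff]
    exact ⟨k, hk, by simp⟩

theorem pv_goA_iff (na nb : String) (G : List (List String)) :
    pvGoA na nb G = true ↔ ∃ g ∈ G, na ∈ g.map pvNorm ∧ nb ∈ g.map pvNorm := by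
  induction G with
  | nil => simp [pvGoA]
  | cons g gs ih =>
    simp only [pvGoA, List.mem_cons]
    by_cases h : (PySem.Set.contains (PySem.Set.ofList (g.map pvNorm)) na &&
        PySem.Set.contains (PySem.Set.ofList (g.map pvNorm)) nb) = true
    · rw [if_pos h]
      rw [Bool.and_eq_true, PySem.Set.contains_iff, PySem.Set.contains_iff,
        PySem.Set.mem_ofList, PySem.Set.mem_ofList] at h
      simp only [true_iff]
      exact ⟨g, Or.inl rfl, h⟩
    · rw [if_neg h, ih]
      rw [Bool.and_eq_true] at h
      constructor
      · rintro ⟨x, hx, hn⟩; exact ⟨x, Or.inr hx, hn⟩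
      · rintro ⟨x, rfl | hx, hn⟩
        · exact absurd ⟨(PySem.Set.contains_iff _ _).mpr ((PySem.Set.mem_ofList _ _).mpr hn.1),
            (PySem.Set.contains_iff _ _).mpr ((PySem.Set.mem_ofList _ _).mpr hn.2)⟩ h
        · exact ⟨x, hx, hn⟩

theorem pv_alt_iff (a b : String) (G : List (List String)) :
    occasion_related_py_alt a b G = true ↔
      ∃ g ∈ G, pvNorm a ∈ g.map pvNorm ∧ pvNorm b ∈ g.map pvNorm := by
  unfold occasion_related_py_alt
  simp only [Bool.not_eq_true']
  rw [Bool.eq_false_iff, ne_eq, PySem.Set.isdisjoint_iff]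
  push_neg
  simp only [pv_mem_index]
  constructor
  · rintro ⟨i, ⟨k, hk, hik, ha⟩, ⟨k', hk', hik', hb⟩⟩
    have : k = k' := by omega
    subst this
    exact ⟨G[k], List.getElem_mem hk, ha, hb⟩
  · rintro ⟨g, hg, ha, hb⟩
    obtain ⟨k, hk, rfl⟩ := List.mem_iff_getElem.mp hg
    exact ⟨(k : Int), ⟨k, hk, rfl, ha⟩, ⟨k, hk, rfl, hb⟩⟩

-- ===== VERDICT (by name: the statement is the Claim_ definition above) =====
theorem occasion_related_py_spec : Claim_equal_occasion_related_py := by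
  intro a b G _
  unfold Spec_occasion_related_py occasion_related_py
  rw [Bool.eq_iff_iff, pv_goA_iff, pv_alt_iff]
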